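-- pv_equiv track=rewrite | github.com/dengkliu/algorithms | card_game.py | numOfPlan
-- ===== SOURCE A (Python) =====
-- def numOfPlan(n, totalProfit, totalCost, a, b):
--
--     MOD = 10**9 + 7
--
--     # 方便初始化
--     totalProfit += 1
--     totalCost -= 1
--
--     # python 定义 array 先column 再 row
--     dp = [[[0 for c in range(totalCost  + 1)] for r in range(totalProfit + 1)] for k in range(n + 1)]
--
--     # dp[0][0][0] = 1
--     # dp[i][0][0] = 1
--     # dp[0][i][0] = 0
--     # dp[0][0][i] = 1 --> profit超过或者等于0总有一种情况
--
--     # 初始化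
--     for cost in range(0, totalCost + 1):
--            dp[0][0][cost] = 1
--
--     # 从有两张卡开始
--     for i in range(1, n + 1):
--         for profit in range(0, totalProfit + 1):
--             for cost in range(0, totalCost + 1):
--                 # 不拿这张卡
--                 dp[i][profit][cost] = dp[i-1][profit][cost]
--                 # 拿这张卡
--                 if cost >= b[i-1]:
--                     # 假如这张卡的profit大于当前profit 要拿！
--                     prevProfit = max([0, profit - a[i-1]])
--                     dp[i][profit][cost] += dp[i-1][prevProfit][cost-b[i-1]]
--                     # 先加完最后取模
--                     dp[i][profit][cost] %= MOD
--
--     return dp[n][totalProfit][totalCost]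
-- ===== SOURCE B (Python) =====
-- def numOfPlan(n, totalProfit, totalCost, a, b):
--     MOD = 10**9 + 7
--     totalProfit += 1
--     totalCost -= 1
--     cache = {}
--
--     def f(i, profit, cost):
--         if i == 0:
--             return 1 if profit == 0 else 0
--         key = (i, profit, cost)
--         if key in cache:
--             return cache[key]
--         res = f(i - 1, profit, cost)
--         if cost >= b[i - 1]:
--             res = (res + f(i - 1, max(0, profit - a[i - 1]), cost - b[i - 1])) % MOD
--         cache[key] = res
--         return res
--
--     return f(n, totalProfit, totalCost)
-- ===== Notes on version B (the rewrite author's own statement) =====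
-- stated objective: faster
-- what changed: Replaces A's eagerly pre-computed bottom-up 3D DP table (triple nested loops over layers x profits x costs) with a top-down memoized recursion f(i, profit, cost) whose dict cache fills only the states actually reachable from (n, totalProfit+1, totalCost-1).
import Mathlib
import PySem

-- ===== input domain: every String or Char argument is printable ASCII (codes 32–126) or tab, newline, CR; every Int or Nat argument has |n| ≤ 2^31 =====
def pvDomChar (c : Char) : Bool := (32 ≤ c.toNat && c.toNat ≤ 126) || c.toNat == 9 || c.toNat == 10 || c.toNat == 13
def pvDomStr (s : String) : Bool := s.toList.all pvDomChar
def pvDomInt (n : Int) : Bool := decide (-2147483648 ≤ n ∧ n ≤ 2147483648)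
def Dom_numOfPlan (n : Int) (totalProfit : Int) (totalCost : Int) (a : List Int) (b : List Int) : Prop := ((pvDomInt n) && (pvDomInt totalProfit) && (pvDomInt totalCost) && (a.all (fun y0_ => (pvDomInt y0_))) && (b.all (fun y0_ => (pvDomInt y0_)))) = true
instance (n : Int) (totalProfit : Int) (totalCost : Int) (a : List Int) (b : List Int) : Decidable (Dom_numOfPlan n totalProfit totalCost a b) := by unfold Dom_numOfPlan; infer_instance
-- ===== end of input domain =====

-- B replaces A's bottom-up 3-dimensional DP table with a lazy top-down memoized recursion
-- (dict cache keyed by (i, profit, cost)); alternative decomposition, same asymptotic cost.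

-- ===== PORT A =====
-- dp[p][c] read: negative indices wrap as in Python (pyGet?); an out-of-range read — an
-- IndexError in Python, excluded by Pre_ — defaults to 0 here
def pvRead (rows : List (List Int)) (p c : Int) : Int :=
  (PySem.List.pyGet? ((PySem.List.pyGet? rows p).getD []) c).getD 0

-- one iteration of A's outer 'for i in range(1, n+1)' loop: appends layer dp[i], each cell
-- computed from layer dp[i-1] exactly as A's two inner loops write it
def pvStepA (a b profits costs : List Int) (dp : List (List (List Int))) (i : Int) : List (List (List Int)) :=
  let prev := (PySem.List.pyGet? dp (i - 1)).getD []
  let bi := (PySem.List.pyGet? b (i - 1)).getD 0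
  let ai := (PySem.List.pyGet? a (i - 1)).getD 0
  dp ++ [profits.map (fun profit => costs.map (fun cost =>
    let v := pvRead prev profit cost
    if bi ≤ cost then PySem.Int.mod (v + pvRead prev (max 0 (profit - ai)) (cost - bi)) 1000000007
    else v))]

def numOfPlan (n : Int) (totalProfit : Int) (totalCost : Int) (a : List Int) (b : List Int) : Int :=
  let totalProfit := totalProfit + 1
  let totalCost := totalCost - 1
  let profits := PySem.List.pyRange 0 (totalProfit + 1) 1
  let costs := PySem.List.pyRange 0 (totalCost + 1) 1
  -- dp[0] = zero table; the init loop 'for cost: dp[0][0][cost] = 1' fills row 0 with ones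
  let zeros : List (List Int) := profits.map (fun _ => costs.map (fun _ => 0))
  let layer0 := PySem.List.pySetD zeros 0 (costs.map (fun _ => 1))
  let dp := (PySem.List.pyRange 1 (n + 1) 1).foldl (pvStepA a b profits costs) [layer0]
  pvRead ((PySem.List.pyGet? dp n).getD []) totalProfit totalCost

-- ===== PORT B =====
-- f(i, profit, cost) with its dict cache, transliterating Source B's inner 'f'; the recursion is on
-- the Nat i (Source B only ever calls f with i in 0..n; n < 0 is outside Pre_, see numOfPlan_alt)
def pvF (a b : List Int) : Nat → Int → Int → PySem.Dict (Int × Int × Int) Int → Int × PySem.Dict (Int × Int × Int) Int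
  | 0, p, _c, cache => (if p = 0 then 1 else 0, cache)
  | i+1, p, c, cache =>
    match cache.get? ((i : Int) + 1, p, c) with
    | some v => (v, cache)
    | none =>
      let r1 := pvF a b i p c cache
      let bi := (PySem.List.pyGet? b i).getD 0
      let rc :=
        if bi ≤ c then
          let ai := (PySem.List.pyGet? a i).getD 0
          let r2 := pvF a b i (max 0 (p - ai)) (c - bi) r1.2
          (PySem.Int.mod (r1.1 + r2.1) 1000000007, r2.2)
        else r1
      (rc.1, rc.2.insert ((i : Int) + 1, p, c) rc.1)

def numOfPlan_alt (n : Int) (totalProfit : Int) (totalCost : Int) (a : List Int) (b : List Int) : Int :=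
  let totalProfit := totalProfit + 1
  let totalCost := totalCost - 1
  -- Source B's recursion does not terminate for n < 0 (outside Pre_); the guard only makes the port total
  if n < 0 then 0 else (pvF a b n.toNat totalProfit totalCost PySem.Dict.empty).1

-- ===== PRECONDITION & SPEC =====
-- Pre_ is exactly where A returns: on every other input A raises IndexError (empty table
-- dimensions when n < 0, totalCost < 1 or totalProfit < -1; b shorter than n or a negative b
-- entry; a too short or a negative a entry at a position i whose cost b[i] fits the budget,
-- so that the take-branch fires).  No input on which A returns a value is excluded.
def Pre_numOfPlan (n : Int) (totalProfit : Int) (totalCost : Int) (a : List Int) (b : List Int) : Prop :=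
  0 ≤ n ∧ n ≤ (b.length : Int) ∧ 1 ≤ totalCost ∧ -1 ≤ totalProfit ∧
  ∀ i < n.toNat, 0 ≤ b.getD i 0 ∧
    (totalCost - 1 < b.getD i 0 ∨ ((i : Int) < (a.length : Int) ∧ 0 ≤ a.getD i 0))
instance (n : Int) (totalProfit : Int) (totalCost : Int) (a : List Int) (b : List Int) : Decidable (Pre_numOfPlan n totalProfit totalCost a b) := by unfold Pre_numOfPlan; infer_instance

def pvWitness_numOfPlan : Int × Int × Int × List Int × List Int := (2, 1, 3, [3, 2], [1, 1])

def Spec_numOfPlan (n : Int) (totalProfit : Int) (totalCost : Int) (a : List Int) (b : List Int) (out : Int) : Prop := out = numOfPlan_alt n totalProfit totalCost a b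
instance (n : Int) (totalProfit : Int) (totalCost : Int) (a : List Int) (b : List Int) (out : Int) : Decidable (Spec_numOfPlan n totalProfit totalCost a b out) := by unfold Spec_numOfPlan; infer_instance

-- ===== CLAIM (what is proved, stated in full; the proofs are below) =====
def Claim_equal_numOfPlan : Prop := ∀ (n : Int) (totalProfit : Int) (totalCost : Int) (a : List Int) (b : List Int), Dom_numOfPlan n totalProfit totalCost a b → Pre_numOfPlan n totalProfit totalCost a b → Spec_numOfPlan n totalProfit totalCost a b (numOfPlan n totalProfit totalCost a b)

-- ===== LEMMAS AND PROOFS =====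

-- the recurrence both programs compute: pvG a b i p c is A's dp[i][p][c] and B's f(i, p, c)
def pvG (a b : List Int) : Nat → Int → Int → Int
  | 0, p, _ => if p = 0 then 1 else 0
  | i+1, p, c =>
    let bi := (PySem.List.pyGet? b i).getD 0
    let ai := (PySem.List.pyGet? a i).getD 0
    if bi ≤ c then PySem.Int.mod (pvG a b i p c + pvG a b i (max 0 (p - ai)) (c - bi)) 1000000007
    else pvG a b i p c

-- ---- B side: the memoized recursion computes pvG ----

-- cache invariant: every stored value is the recurrence's value at its key
def pvCacheOK (a b : List Int) (cache : PySem.Dict (Int × Int × Int) Int) : Prop :=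
  ∀ (i : Nat) (p c v : Int), cache.get? ((i : Int), p, c) = some v → v = pvG a b i p c

theorem pvF_eq (a b : List Int) (i : Nat) : ∀ (p c : Int) (cache : PySem.Dict (Int × Int × Int) Int),
    pvCacheOK a b cache →
    (pvF a b i p c cache).1 = pvG a b i p c ∧ pvCacheOK a b (pvF a b i p c cache).2 := by
  induction i with
  | zero => intro p c cache hok; exact ⟨rfl, hok⟩
  | succ i ih =>
    intro p c cache hok
    have hGsucc : pvG a b (i+1) p c =
        if (PySem.List.pyGet? b (i : Int)).getD 0 ≤ c then
          PySem.Int.mod (pvG a b i p c +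
            pvG a b i (max 0 (p - (PySem.List.pyGet? a (i : Int)).getD 0))
              (c - (PySem.List.pyGet? b (i : Int)).getD 0)) 1000000007
        else pvG a b i p c := by rw [pvG]
    cases hget : cache.get? ((i : Int) + 1, p, c) with
    | some v =>
      have key : pvF a b (i+1) p c cache = (v, cache) := by rw [pvF, hget]
      have hv : v = pvG a b (i+1) p c := hok (i+1) p c v (by push_cast; exact hget)
      rw [key]
      exact ⟨hv, hok⟩
    | none =>
      obtain ⟨h1, hok1⟩ := ih p c cache hok
      rw [pvF, hget]
      by_cases hbc : (PySem.List.pyGet? b (i : Int)).getD 0 ≤ c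
      · obtain ⟨h2, hok2⟩ := ih (max 0 (p - (PySem.List.pyGet? a (i : Int)).getD 0))
          (c - (PySem.List.pyGet? b (i : Int)).getD 0) _ hok1
        simp only [if_pos hbc]
        constructor
        · rw [h1, h2, hGsucc, if_pos hbc]
        · intro j q d w hw
          rw [PySem.Dict.get?_insert] at hw
          split at hw
          · rename_i heq
            have hj : (j : Int) = (i : Int) + 1 := congrArg Prod.fst heq
            have hq : q = p := congrArg (fun t => t.2.1) heq
            have hd : d = c := congrArg (fun t => t.2.2) heq
            have hj' : j = i + 1 := by exact_mod_cast hj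
            subst hj'
            cases hw
            rw [hq, hd, h1, h2, hGsucc, if_pos hbc]
          · exact hok2 j q d w hw
      · simp only [if_neg hbc]
        constructor
        · rw [h1, hGsucc, if_neg hbc]
        · intro j q d w hw
          rw [PySem.Dict.get?_insert] at hw
          split at hw
          · rename_i heq
            have hj : (j : Int) = (i : Int) + 1 := congrArg Prod.fst heq
            have hq : q = p := congrArg (fun t => t.2.1) heq
            have hd : d = c := congrArg (fun t => t.2.2) heq
            have hj' : j = i + 1 := by exact_mod_cast hj
            subst hj'
            cases hw
            rw [hq, hd, h1, hGsucc, if_neg hbc]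
          · exact hok1 j q d w hw

theorem alt_eq_pvG (n totalProfit totalCost : Int) (a b : List Int) (hn : 0 ≤ n) :
    numOfPlan_alt n totalProfit totalCost a b = pvG a b n.toNat (totalProfit + 1) (totalCost - 1) := by
  simp only [numOfPlan_alt, if_neg (not_lt.2 hn)]
  exact (pvF_eq a b n.toNat (totalProfit + 1) (totalCost - 1) PySem.Dict.empty
    (fun i p c v hv => by rw [PySem.Dict.get?_empty] at hv; cases hv)).1

-- ---- A side: the DP table holds pvG ----

-- layer j of A's table, written as what it provably contains
def pvLayer (a b : List Int) (P C : Int) (j : Nat) : List (List Int) :=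
  (PySem.List.pyRange 0 (P+1) 1).map (fun p => (PySem.List.pyRange 0 (C+1) 1).map (fun c => pvG a b j p c))

theorem pvRead_map (f : Int → Int → Int) (P C p c : Int)
    (hp0 : 0 ≤ p) (hp : p < P + 1) (hc0 : 0 ≤ c) (hc : c < C + 1) :
    pvRead ((PySem.List.pyRange 0 (P+1) 1).map (fun q => (PySem.List.pyRange 0 (C+1) 1).map (fun d => f q d))) p c = f p c := by
  unfold pvRead
  rw [PySem.List.pyGet?_of_nonneg _ hp0, List.getElem?_map, PySem.List.getElem?_pyRange_one,
    if_pos (by omega : p.toNat < (P + 1 - 0).toNat)]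
  simp only [Option.map_some, Option.getD_some]
  rw [PySem.List.pyGet?_of_nonneg _ hc0, List.getElem?_map, PySem.List.getElem?_pyRange_one,
    if_pos (by omega : c.toNat < (C + 1 - 0).toNat)]
  simp only [Option.map_some, Option.getD_some]
  rw [show (0 : Int) + ↑p.toNat = p by omega, show (0 : Int) + ↑c.toNat = c by omega]

theorem pvRead_pvLayer (a b : List Int) (P C : Int) (j : Nat) (p c : Int)
    (hp0 : 0 ≤ p) (hp : p < P + 1) (hc0 : 0 ≤ c) (hc : c < C + 1) :
    pvRead (pvLayer a b P C j) p c = pvG a b j p c :=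
  pvRead_map (pvG a b j) P C p c hp0 hp hc0 hc

theorem pvLayers (a b : List Int) (n : Nat) (P C : Int)
    (hab : ∀ k < n, 0 ≤ b.getD k 0 ∧ (C < b.getD k 0 ∨ 0 ≤ a.getD k 0)) :
    (PySem.List.pyRange 1 ((n : Int) + 1) 1).foldl
        (pvStepA a b (PySem.List.pyRange 0 (P+1) 1) (PySem.List.pyRange 0 (C+1) 1))
        [pvLayer a b P C 0]
      = (List.range (n+1)).map (pvLayer a b P C) := by
  induction n with
  | zero =>
    have h0 : PySem.List.pyRange 1 ((0:Nat) + 1 : Int) 1 = [] :=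
      PySem.List.pyRange_one_eq_nil (by simp)
    rw [h0]
    simp [List.range_succ]
  | succ n ih =>
    have hab' : ∀ k < n, 0 ≤ b.getD k 0 ∧ (C < b.getD k 0 ∨ 0 ≤ a.getD k 0) :=
      fun k hk => hab k (by omega)
    have hsplit : PySem.List.pyRange 1 ((↑(n+1) : Int) + 1) 1
        = PySem.List.pyRange 1 ((n : Int) + 1) 1 ++ [(n : Int) + 1] := by
      rw [show ((↑(n+1) : Int) + 1) = ((n : Int) + 1) + 1 by push_cast; ring]
      exact PySem.List.pyRange_one_succ_right (by omega)
    rw [hsplit, List.foldl_append, ih hab']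
    rw [List.foldl_cons, List.foldl_nil]
    unfold pvStepA
    have hidx : ((n : Int) + 1 - 1) = (n : Int) := by ring
    rw [hidx]
    have hprev : (PySem.List.pyGet? ((List.range (n+1)).map (pvLayer a b P C)) (n : Int)).getD []
        = pvLayer a b P C n := by
      rw [PySem.List.pyGet?_natCast, List.getElem?_map, List.getElem?_range (by omega)]
      simp
    rw [hprev]
    rw [show List.range (n+1+1) = List.range (n+1) ++ [n+1] from List.range_succ, List.map_append]
    refine congrArg₂ (· ++ ·) rfl (congrArg (fun x => [x]) ?_)
    conv_rhs => unfold pvLayer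
    apply List.map_congr_left
    intro p hpmem
    obtain ⟨hp0, hp1⟩ := PySem.List.mem_pyRange_one.1 hpmem
    apply List.map_congr_left
    intro c hcmem
    obtain ⟨hc0, hc1⟩ := PySem.List.mem_pyRange_one.1 hcmem
    have hbget : (PySem.List.pyGet? b (n : Int)).getD 0 = b.getD n 0 := by
      rw [PySem.List.pyGet?_natCast, List.getD_eq_getElem?_getD]
    have haget : (PySem.List.pyGet? a (n : Int)).getD 0 = a.getD n 0 := by
      rw [PySem.List.pyGet?_natCast, List.getD_eq_getElem?_getD]
    obtain ⟨hbnn, hcase⟩ := hab n (by omega)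
    have hGsucc : pvG a b (n+1) p c =
        if (PySem.List.pyGet? b (n : Int)).getD 0 ≤ c then
          PySem.Int.mod (pvG a b n p c +
            pvG a b n (max 0 (p - (PySem.List.pyGet? a (n : Int)).getD 0))
              (c - (PySem.List.pyGet? b (n : Int)).getD 0)) 1000000007
        else pvG a b n p c := by rw [pvG]
    by_cases hbc : (PySem.List.pyGet? b (n : Int)).getD 0 ≤ c
    · have hanng : 0 ≤ (PySem.List.pyGet? a (n : Int)).getD 0 := by
        rcases hcase with hcb | hca
        · exfalso; rw [hbget] at hbc; omega
        · rw [haget]; exact hca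
      simp only [if_pos hbc]
      rw [pvRead_pvLayer a b P C n p c hp0 hp1 hc0 hc1]
      rw [pvRead_pvLayer a b P C n _ _ (by omega) (by omega) (by rw [hbget] at hbc ⊢; omega)
        (by rw [hbget] at hbc ⊢; omega)]
      rw [hGsucc, if_pos hbc]
    · simp only [if_neg hbc]
      rw [pvRead_pvLayer a b P C n p c hp0 hp1 hc0 hc1]
      rw [hGsucc, if_neg hbc]

theorem pvSetD_cons_zero {α : Type} (x : α) (t : List α) (v : α) :
    PySem.List.pySetD (x :: t) 0 v = v :: t := by
  unfold PySem.List.pySetD PySem.List.pySet? PySem.List.pyIdx?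
  simp

theorem pvLayer0_eq (a b : List Int) (P C : Int) (hP : 0 ≤ P) :
    PySem.List.pySetD
      ((PySem.List.pyRange 0 (P+1) 1).map (fun _ => (PySem.List.pyRange 0 (C+1) 1).map (fun _ => (0:Int))))
      0 ((PySem.List.pyRange 0 (C+1) 1).map (fun _ => (1:Int)))
    = pvLayer a b P C 0 := by
  rw [PySem.List.pyRange_one_cons (show (0:Int) < P + 1 by omega)]
  unfold pvLayer
  rw [PySem.List.pyRange_one_cons (show (0:Int) < P + 1 by omega)]
  simp only [List.map_cons]
  rw [pvSetD_cons_zero]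
  refine congrArg₂ (· :: ·) ?_ ?_
  · apply List.map_congr_left
    intro c _
    rw [pvG]
    norm_num
  · apply List.map_congr_left
    intro p hpmem
    obtain ⟨hp0, _⟩ := PySem.List.mem_pyRange_one.1 hpmem
    apply List.map_congr_left
    intro c _
    rw [pvG]
    simp only [if_neg (by omega : ¬ p = 0)]

theorem numOfPlan_eq_pvG (n totalProfit totalCost : Int) (a b : List Int)
    (hn : 0 ≤ n) (htc : 1 ≤ totalCost) (htp : -1 ≤ totalProfit)
    (hab : ∀ i < n.toNat, 0 ≤ b.getD i 0 ∧
      (totalCost - 1 < b.getD i 0 ∨ ((i : Int) < (a.length : Int) ∧ 0 ≤ a.getD i 0))) :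
    numOfPlan n totalProfit totalCost a b = pvG a b n.toNat (totalProfit + 1) (totalCost - 1) := by
  have hab' : ∀ k < n.toNat, 0 ≤ b.getD k 0 ∧
      (totalCost - 1 < b.getD k 0 ∨ 0 ≤ a.getD k 0) := by
    intro k hk
    obtain ⟨h1, h2⟩ := hab k hk
    refine ⟨h1, ?_⟩
    rcases h2 with h | ⟨_, h⟩
    · exact Or.inl h
    · exact Or.inr h
  have hN : n = ((n.toNat : Nat) : Int) := (Int.toNat_of_nonneg hn).symm
  simp only [numOfPlan]
  rw [pvLayer0_eq a b (totalProfit + 1) (totalCost - 1) (by omega)]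
  rw [hN]
  rw [pvLayers a b n.toNat (totalProfit + 1) (totalCost - 1) hab']
  have hprev : (PySem.List.pyGet? ((List.range (n.toNat + 1)).map (pvLayer a b (totalProfit + 1) (totalCost - 1))) (n.toNat : Int)).getD []
      = pvLayer a b (totalProfit + 1) (totalCost - 1) n.toNat := by
    rw [PySem.List.pyGet?_natCast, List.getElem?_map, List.getElem?_range (by omega)]
    simp
  rw [hprev]
  exact pvRead_pvLayer a b (totalProfit + 1) (totalCost - 1) n.toNat (totalProfit + 1) (totalCost - 1)
    (by omega) (by omega) (by omega) (by omega)

-- ===== VERDICT (by name: the statement is the Claim_ definition above) =====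
theorem numOfPlan_spec : Claim_equal_numOfPlan := by
  intro n totalProfit totalCost a b _hD hP
  obtain ⟨hn, _hlen, htc, htp, hab⟩ := hP
  unfold Spec_numOfPlan
  rw [numOfPlan_eq_pvG n totalProfit totalCost a b hn htc htp hab,
      alt_eq_pvG n totalProfit totalCost a b hn]
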